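-- pv_equiv track=rewrite | github.com/estebandurangov/SO-Final-Project | app/main.py | calculateBestRR
-- ===== SOURCE A (Python) =====
-- def find_min_position(list):
--     min_value = min(list)
--     min_position = list.index(min_value)
--     return min_position
--
-- def calculateBestRR(RR):
--     quantums = [1, 2, 4, 8]
--     response = []
--     turnaround = []
--     wait = []
--     for rr in RR:
--         response.append(rr[0])
--         turnaround.append(rr[1])
--         wait.append(rr[2])
--
--     bests = [find_min_position(response), find_min_position(turnaround), find_min_position(wait)]
--     if (bests.count(0))>=2:
--         best = 0
--     elif (bests.count(1))>=2:
--         best = 1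
--     elif (bests.count(2))>=2:
--         best = 2
--     else:
--         best = 3
--
--     return RR[best], quantums[best]
-- ===== SOURCE B (Python) =====
-- def calculateBestRR(RR):
--     quantums = [1, 2, 4, 8]
--     first = RR[0]
--     m0, p0 = first[0], 0
--     m1, p1 = first[1], 0
--     m2, p2 = first[2], 0
--     for i, rr in enumerate(RR):
--         if rr[0] < m0:
--             m0, p0 = rr[0], i
--         if rr[1] < m1:
--             m1, p1 = rr[1], i
--         if rr[2] < m2:
--             m2, p2 = rr[2], i
--     positions = [p0, p1, p2]
--     if positions.count(0) >= 2:
--         best = 0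
--     elif positions.count(1) >= 2:
--         best = 1
--     elif positions.count(2) >= 2:
--         best = 2
--     else:
--         best = 3
--     return RR[best], quantums[best]
-- ===== Notes on version B (the rewrite author's own statement) =====
-- stated objective: alternative
-- what changed: Instead of building three column lists and then running min() plus list.index() over each (seven passes over the data), B makes a single pass over enumerate(RR) maintaining a running (min_value, first_position) pair per column, then applies the same majority vote.
import Mathlib
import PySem

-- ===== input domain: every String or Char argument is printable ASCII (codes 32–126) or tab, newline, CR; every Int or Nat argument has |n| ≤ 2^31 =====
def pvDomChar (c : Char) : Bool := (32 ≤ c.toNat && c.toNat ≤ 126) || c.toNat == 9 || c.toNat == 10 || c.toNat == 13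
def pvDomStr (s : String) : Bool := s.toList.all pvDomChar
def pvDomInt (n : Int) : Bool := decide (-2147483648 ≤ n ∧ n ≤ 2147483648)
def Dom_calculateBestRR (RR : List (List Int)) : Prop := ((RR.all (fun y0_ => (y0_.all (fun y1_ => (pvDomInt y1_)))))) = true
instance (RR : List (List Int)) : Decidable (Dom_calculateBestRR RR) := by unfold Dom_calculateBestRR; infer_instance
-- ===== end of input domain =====

-- B replaces A's three column lists plus three min()+list.index() scans by one pass over
-- enumerate(RR) keeping a running (min, first position) pair per column; same majority vote.

-- ===== PORT A =====
def pvFindMinPosition (l : List Int) : Option Int :=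
  match PySem.List.min? l (fun x => x) with
  | none => none                     -- min([]) raises ValueError
  | some m =>
    match PySem.List.index? l m with
    | none => none
    | some p => some (p : Int)

def pvColsStep (acc : Option (List Int × List Int × List Int)) (rr : List Int) :
    Option (List Int × List Int × List Int) :=
  match acc with
  | none => none
  | some (r, t, w) =>
    match PySem.List.pyGet? rr 0, PySem.List.pyGet? rr 1, PySem.List.pyGet? rr 2 with
    | some a, some b, some c => some (r ++ [a], t ++ [b], w ++ [c])
    | _, _, _ => none               -- rr[j] raises IndexError

def calculateBestRR (RR : List (List Int)) : List Int × Int :=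
  (match RR.foldl pvColsStep (some ([], [], [])) with
   | none => none
   | some (response, turnaround, wait) =>
     match pvFindMinPosition response, pvFindMinPosition turnaround, pvFindMinPosition wait with
     | some b0, some b1, some b2 =>
       let bests : List Int := [b0, b1, b2]
       let best : Int :=
         if 2 ≤ PySem.List.count bests 0 then 0
         else if 2 ≤ PySem.List.count bests 1 then 1
         else if 2 ≤ PySem.List.count bests 2 then 2
         else 3
       match PySem.List.pyGet? RR best, PySem.List.pyGet? ([1, 2, 4, 8] : List Int) best with
       | some row, some q => some (row, q)
       | _, _ => none               -- RR[best] raises IndexError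
     | _, _, _ => none
   ).getD ([], 0)

-- ===== PORT B =====
def pvScanStep (acc : Option ((Int × Int) × (Int × Int) × (Int × Int))) (p : Int × List Int) :
    Option ((Int × Int) × (Int × Int) × (Int × Int)) :=
  match acc with
  | none => none
  | some (s0, s1, s2) =>
    match PySem.List.pyGet? p.2 0, PySem.List.pyGet? p.2 1, PySem.List.pyGet? p.2 2 with
    | some a, some b, some c =>
      some (if a < s0.1 then (a, p.1) else s0,
            if b < s1.1 then (b, p.1) else s1,
            if c < s2.1 then (c, p.1) else s2)
    | _, _, _ => none               -- rr[j] raises IndexError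

def calculateBestRR_alt (RR : List (List Int)) : List Int × Int :=
  (match PySem.List.pyGet? RR 0 with
   | none => none                   -- RR[0] raises IndexError
   | some first =>
     match PySem.List.pyGet? first 0, PySem.List.pyGet? first 1, PySem.List.pyGet? first 2 with
     | some m0, some m1, some m2 =>
       match (PySem.List.enumerate RR 0).foldl pvScanStep
           (some ((m0, (0 : Int)), (m1, (0 : Int)), (m2, (0 : Int)))) with
       | none => none
       | some (s0, s1, s2) =>
         let positions : List Int := [s0.2, s1.2, s2.2]
         let best : Int :=
           if 2 ≤ PySem.List.count positions 0 then 0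
           else if 2 ≤ PySem.List.count positions 1 then 1
           else if 2 ≤ PySem.List.count positions 2 then 2
           else 3
         match PySem.List.pyGet? RR best, PySem.List.pyGet? ([1, 2, 4, 8] : List Int) best with
         | some row, some q => some (row, q)
         | _, _ => none
     | _, _, _ => none
   ).getD ([], 0)

-- ===== PRECONDITION & SPEC =====
-- Pre_ is exactly where Python A returns normally: every row has length ≥ 3 (else rr[j] raises
-- IndexError), RR is nonempty (else min([]) raises ValueError), and the majority-voted index is
-- in range (else RR[best] raises IndexError).  pvPos/pvBest state declaratively, via library
-- min / first index, which index the vote selects.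
def pvG (k : Nat) (rr : List Int) : Int := rr.getD k 0

def pvPos (l : List Int) : Nat := l.idxOf (l.min?.getD 0)

def pvBest (RR : List (List Int)) : Nat :=
  let ps := [pvPos (RR.map (pvG 0)), pvPos (RR.map (pvG 1)), pvPos (RR.map (pvG 2))]
  if 2 ≤ ps.count 0 then 0 else if 2 ≤ ps.count 1 then 1 else if 2 ≤ ps.count 2 then 2 else 3

def Pre_calculateBestRR (RR : List (List Int)) : Prop :=
  (∀ rr ∈ RR, 3 ≤ rr.length) ∧ RR ≠ [] ∧ pvBest RR < RR.length
instance (RR : List (List Int)) : Decidable (Pre_calculateBestRR RR) := by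
  unfold Pre_calculateBestRR; infer_instance

def pvWitness_calculateBestRR : List (List Int) :=
  [[3, 1, 2], [0, 5, 5], [7, 0, 0], [9, 9, 9]]

def Spec_calculateBestRR (RR : List (List Int)) (out : List Int × Int) : Prop := out = calculateBestRR_alt RR
instance (RR : List (List Int)) (out : List Int × Int) : Decidable (Spec_calculateBestRR RR out) := by unfold Spec_calculateBestRR; infer_instance

-- ===== CLAIM (what is proved, stated in full; the proofs are below) =====
def Claim_equal_calculateBestRR : Prop := ∀ (RR : List (List Int)), Dom_calculateBestRR RR → Pre_calculateBestRR RR → Spec_calculateBestRR RR (calculateBestRR RR)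

-- ===== LEMMAS AND PROOFS =====

-- the pure per-column scan both fold lemmas are reduced to
def pvScan (s : Int × Int) (i : Int) : List Int → Int × Int
  | [] => s
  | y :: ys => pvScan (if y < s.1 then (y, i) else s) (i + 1) ys

-- characterisation of a (min, first argmin) pair for a list
def pvArgmin (l : List Int) (s : Int × Int) : Prop :=
  (∀ y ∈ l, s.1 ≤ y) ∧
  ∃ q : Nat, s.2 = (q : Int) ∧ l[q]? = some s.1 ∧
    ∀ k < q, ∀ u, l[k]? = some u → s.1 < u

lemma pvGet3 (rr : List Int) (h : 3 ≤ rr.length) :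
    PySem.List.pyGet? rr 0 = some (pvG 0 rr) ∧
    PySem.List.pyGet? rr 1 = some (pvG 1 rr) ∧
    PySem.List.pyGet? rr 2 = some (pvG 2 rr) := by
  refine ⟨?_, ?_, ?_⟩
  · rw [show (0 : Int) = ((0 : Nat) : Int) from rfl,
        PySem.List.pyGet?_ofNat rr 0 (by omega)]
    simp [pvG, List.getD_eq_getElem?_getD, List.getElem?_eq_getElem (by omega : 0 < rr.length)]
  · rw [show (1 : Int) = ((1 : Nat) : Int) from rfl,
        PySem.List.pyGet?_ofNat rr 1 (by omega)]
    simp [pvG, List.getD_eq_getElem?_getD, List.getElem?_eq_getElem (by omega : 1 < rr.length)]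
  · rw [show (2 : Int) = ((2 : Nat) : Int) from rfl,
        PySem.List.pyGet?_ofNat rr 2 (by omega)]
    simp [pvG, List.getD_eq_getElem?_getD, List.getElem?_eq_getElem (by omega : 2 < rr.length)]

lemma pvColsA (RR : List (List Int)) (h : ∀ rr ∈ RR, 3 ≤ rr.length) (r t w : List Int) :
    RR.foldl pvColsStep (some (r, t, w)) =
      some (r ++ RR.map (pvG 0), t ++ RR.map (pvG 1), w ++ RR.map (pvG 2)) := by
  induction RR generalizing r t w with
  | nil => simp
  | cons rr rest ih =>
    have h3 : 3 ≤ rr.length := h rr (by simp)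
    obtain ⟨e0, e1, e2⟩ := pvGet3 rr h3
    simp only [List.foldl_cons, pvColsStep, e0, e1, e2]
    rw [ih (fun x hx => h x (by simp [hx]))]
    simp

lemma pvScanB (RR : List (List Int)) (h : ∀ rr ∈ RR, 3 ≤ rr.length)
    (s0 s1 s2 : Int × Int) (i : Int) :
    (PySem.List.enumerate RR i).foldl pvScanStep (some (s0, s1, s2)) =
      some (pvScan s0 i (RR.map (pvG 0)), pvScan s1 i (RR.map (pvG 1)),
            pvScan s2 i (RR.map (pvG 2))) := by
  induction RR generalizing s0 s1 s2 i with
  | nil => simp [PySem.List.enumerate_nil, pvScan]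
  | cons rr rest ih =>
    have h3 : 3 ≤ rr.length := h rr (by simp)
    obtain ⟨e0, e1, e2⟩ := pvGet3 rr h3
    rw [PySem.List.enumerate_cons]
    simp only [List.foldl_cons, pvScanStep, e0, e1, e2]
    rw [ih (fun x hx => h x (by simp [hx]))]
    simp [pvScan]

lemma pvScan_self (x : Int) (p i : Int) (cs : List Int) :
    pvScan (x, p) i (x :: cs) = pvScan (x, p) (i + 1) cs := by
  simp [pvScan]

lemma pvScan_char (cs : List Int) : ∀ (pre : List Int) (v : Int) (p : Nat),
    pvArgmin pre (v, (p : Int)) →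
    pvArgmin (pre ++ cs) (pvScan (v, (p : Int)) (pre.length : Int) cs) := by
  induction cs with
  | nil => intro pre v p hP; simpa [pvScan] using hP
  | cons y ys ih =>
    intro pre v p hP
    obtain ⟨hmin, q, hq, hget, hfirst⟩ := hP
    have hpq : q = p := by simpa using hq.symm
    subst hpq
    have hqlt : q < pre.length := (List.getElem?_eq_some_iff.mp hget).1
    have hstep : pvScan (v, (q : Int)) (pre.length : Int) (y :: ys) =
        pvScan (if y < v then (y, (pre.length : Int)) else (v, (q : Int)))
          ((pre.length : Int) + 1) ys := by
      simp [pvScan]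
    have hlen : ((pre ++ [y]).length : Int) = (pre.length : Int) + 1 := by simp
    have happ : pre ++ y :: ys = (pre ++ [y]) ++ ys := by simp
    rw [happ, hstep]
    by_cases hy : y < v
    · simp only [hy, if_pos]
      have hP' : pvArgmin (pre ++ [y]) (y, ((pre.length : Nat) : Int)) := by
        refine ⟨?_, pre.length, rfl, ?_, ?_⟩
        · intro z hz
          rcases List.mem_append.mp hz with hz | hz
          · exact le_of_lt (lt_of_lt_of_le hy (hmin z hz))
          · simp at hz; omega
        · simp
        · intro k hk u hu
          have hu' : pre[k]? = some u := by
            rwa [List.getElem?_append_left hk] at hu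
          have hmemu : u ∈ pre := List.mem_of_getElem? hu'
          exact lt_of_lt_of_le hy (hmin u hmemu)
      have hr := ih (pre ++ [y]) y pre.length hP'
      rwa [hlen] at hr
    · simp only [hy, if_neg, not_false_iff]
      have hP' : pvArgmin (pre ++ [y]) (v, (q : Int)) := by
        refine ⟨?_, q, rfl, ?_, ?_⟩
        · intro z hz
          rcases List.mem_append.mp hz with hz | hz
          · exact hmin z hz
          · simp at hz; subst hz; omega
        · rw [List.getElem?_append_left hqlt]; exact hget
        · intro k hk u hu
          have hu' : pre[k]? = some u := by
            rwa [List.getElem?_append_left (hk.trans hqlt)] at hu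
          exact hfirst k hk u hu'
      have hr := ih (pre ++ [y]) v q hP'
      rwa [hlen] at hr

lemma pvFindMin_of_argmin (l : List Int) (s : Int × Int) (h : pvArgmin l s) :
    pvFindMinPosition l = some s.2 := by
  obtain ⟨hmin, q, hq, hget, hfirst⟩ := h
  have hmem : s.1 ∈ l := List.mem_of_getElem? hget
  have hne : l ≠ [] := by intro e; subst e; simp at hmem
  obtain ⟨m, hm⟩ : ∃ m, PySem.List.min? l (fun x => x) = some m := by
    cases e : PySem.List.min? l (fun x => x) with
    | none => exact absurd ((PySem.List.min?_eq_none_iff l (fun x => x)).mp e) hne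
    | some m => exact ⟨m, rfl⟩
  have hmmem : m ∈ l := PySem.List.min?_mem hm
  have hmmin : ∀ y ∈ l, m ≤ y := fun y hy => PySem.List.min?_isMin hm y hy
  have hms : m = s.1 := le_antisymm (hmmin _ hmem) (hmin _ hmmem)
  rw [hms] at hm
  obtain ⟨k, hk⟩ : ∃ k, PySem.List.index? l s.1 = some k := by
    cases e : PySem.List.index? l s.1 with
    | none => exact absurd ((PySem.List.index?_eq_none_iff l s.1).mp e) (by simp [hmem])
    | some k => exact ⟨k, rfl⟩
  obtain ⟨hklt, hkget, hkfirst⟩ := PySem.List.getElem_of_index?_eq_some hk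
  have hkq : k = q := by
    by_contra hne'
    rcases Nat.lt_or_ge k q with hlt | hge
    · have hlt' := hfirst k hlt l[k] (List.getElem?_eq_getElem hklt)
      rw [hkget] at hlt'
      exact lt_irrefl _ hlt'
    · have hgt : q < k := by omega
      exact hkfirst q hgt ((List.getElem?_eq_some_iff.mp hget).2)
  rw [hq, ← hkq]
  simp only [pvFindMinPosition, hm, hk]

lemma pvArgmin_head (x : Int) (cs : List Int) :
    pvArgmin (x :: cs) (pvScan (x, (0 : Int)) 1 cs) := by
  have h0 : pvArgmin [x] (x, ((0 : Nat) : Int)) := by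
    refine ⟨by simp, 0, rfl, by simp, by omega⟩
  have := pvScan_char cs [x] x 0 h0
  simpa using this

-- ===== VERDICT (by name: the statement is the Claim_ definition above) =====
theorem calculateBestRR_spec : Claim_equal_calculateBestRR := by
  intro RR _ hpre
  unfold Spec_calculateBestRR
  obtain ⟨hrows, hne, -⟩ := hpre
  obtain ⟨first, rest, rfl⟩ : ∃ f r, RR = f :: r := by
    cases RR with
    | nil => exact absurd rfl hne
    | cons f r => exact ⟨f, r, rfl⟩
  have h3 : 3 ≤ first.length := hrows first (by simp)
  obtain ⟨e0, e1, e2⟩ := pvGet3 first h3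
  -- the common per-column scan results
  have hA := pvColsA (first :: rest) hrows [] [] []
  have hB := pvScanB (first :: rest) hrows
      (pvG 0 first, 0) (pvG 1 first, 0) (pvG 2 first, 0) 0
  have hcol : ∀ k : Nat, (first :: rest).map (pvG k) = pvG k first :: rest.map (pvG k) := by
    simp
  have hskip : ∀ k : Nat,
      pvScan (pvG k first, (0 : Int)) 0 ((first :: rest).map (pvG k)) =
        pvScan (pvG k first, (0 : Int)) 1 (rest.map (pvG k)) := by
    intro k; rw [hcol k, pvScan_self]; norm_num
  have hfmp : ∀ k : Nat,
      pvFindMinPosition ((first :: rest).map (pvG k)) =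
        some (pvScan (pvG k first, (0 : Int)) 1 (rest.map (pvG k))).2 := by
    intro k
    rw [hcol k]
    exact pvFindMin_of_argmin _ _ (pvArgmin_head _ _)
  -- unfold port A
  unfold calculateBestRR
  rw [hA]
  simp only [List.nil_append]
  rw [hfmp 0, hfmp 1, hfmp 2]
  -- unfold port B
  unfold calculateBestRR_alt
  rw [PySem.List.pyGet?_zero_cons]
  simp only [e0, e1, e2]
  rw [hB, hskip 0, hskip 1, hskip 2]
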